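-- pv_equiv track=rewrite | github.com/arvind1606/SortBasedOnDomain | Ex_03_python_topgear_assignment_l1.py | strChk
-- ===== SOURCE A (Python) =====
-- def strChk(in_lst):
--     lst_x = []
--     lst_nonX = []
--     out_lst = []
--
--     for ele in in_lst:
--         # check if element starts with x or X
--         if ele[0] == 'x' or ele[0] == 'X':
--             lst_x.append(ele)
--         else:
--             lst_nonX.append(ele)
--
--     # mearge two lists after sorting
--     out_lst = sorted(lst_x) + sorted(lst_nonX)
--     return out_lst
-- ===== SOURCE B (Python) =====
-- def strChk(in_lst):
--     # single stable sort with a composite (group, value) key instead of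
--     # manual partition + two sorts
--     return sorted(in_lst, key=lambda s: (0 if (s[0] == 'x' or s[0] == 'X') else 1, s))
-- ===== Notes on version B (the rewrite author's own statement) =====
-- stated objective: idiomatic
-- what changed: Replaces the manual partition into two lists followed by two sorts and a concatenation with a single sorted() call using a composite (group, string) key.
import Mathlib
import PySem

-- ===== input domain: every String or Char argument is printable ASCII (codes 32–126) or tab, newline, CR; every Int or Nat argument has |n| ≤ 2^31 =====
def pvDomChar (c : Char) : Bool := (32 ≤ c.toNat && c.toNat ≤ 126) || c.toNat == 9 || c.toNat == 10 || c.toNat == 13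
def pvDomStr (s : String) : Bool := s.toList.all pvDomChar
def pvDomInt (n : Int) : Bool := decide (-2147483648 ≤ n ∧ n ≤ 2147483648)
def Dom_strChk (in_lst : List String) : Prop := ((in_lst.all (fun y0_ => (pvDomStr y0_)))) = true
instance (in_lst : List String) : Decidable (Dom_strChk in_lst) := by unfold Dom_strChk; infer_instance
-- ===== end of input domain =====

-- B replaces A's manual partition + two sorts + concatenation with one stable
-- sort under a composite (group, string) key (objective: idiomatic).


-- ===== PORT A =====
-- literal port of A: one loop partitioning into lst_x / lst_nonX, then two sorts
def strChk (in_lst : List String) : List String :=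
  let st := in_lst.foldl
    (fun (st : List String × List String) ele =>
      if PySem.Str.pyGet? ele 0 == some 'x' || PySem.Str.pyGet? ele 0 == some 'X' then
        (st.1 ++ [ele], st.2)
      else
        (st.1, st.2 ++ [ele]))
    ([], [])
  PySem.List.sorted st.1 (fun s => s) ++ PySem.List.sorted st.2 (fun s => s)

-- ===== PORT B =====
-- literal port of B: sorted(in_lst, key=lambda s: (0 if s[0]=='x' or s[0]=='X' else 1, s))
def strChk_alt (in_lst : List String) : List String :=
  PySem.List.sorted2 in_lst
    (fun s : String =>
      if PySem.Str.pyGet? s 0 == some 'x' || PySem.Str.pyGet? s 0 == some 'X' then (0 : Int) else 1)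
    (fun s => s)

-- ===== PRECONDITION & SPEC =====
-- Pre_ excludes lists containing an empty string: there 'ele[0]' raises IndexError in A (and B's s[0] raises too).
def Pre_strChk (in_lst : List String) : Prop := ∀ s ∈ in_lst, s ≠ ""
instance (in_lst : List String) : Decidable (Pre_strChk in_lst) := by unfold Pre_strChk; infer_instance
def pvWitness_strChk : List String := ["xb", "Xa", "ab", "xb"]

def Spec_strChk (in_lst : List String) (out : List String) : Prop := out = strChk_alt in_lst
instance (in_lst : List String) (out : List String) : Decidable (Spec_strChk in_lst out) := by unfold Spec_strChk; infer_instance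

-- ===== CLAIM (what is proved, stated in full; the proofs are below) =====
def Claim_equal_strChk : Prop := ∀ (in_lst : List String), Dom_strChk in_lst → Pre_strChk in_lst → Spec_strChk in_lst (strChk in_lst)

-- ===== LEMMAS AND PROOFS =====

-- the first-char test both programs use
def pvP (s : String) : Bool :=
  PySem.Str.pyGet? s 0 == some 'x' || PySem.Str.pyGet? s 0 == some 'X'

-- the group of a string: 0 if it starts with x/X, 1 otherwise
def pvGrp (s : String) : Int := if pvP s then 0 else 1

-- B's composite key, as one lexicographic key
def pvKey (s : String) : Lex (Int × String) := toLex (pvGrp s, s)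

theorem pvKey_inj : Function.Injective pvKey := by
  intro a b h
  exact congrArg (fun x => (ofLex x).2) h

-- sorted2's comparison with keys (pvGrp, id) is the comparison of the single lexicographic key pvKey
theorem before_eq :
    (fun a b : String => decide (pvGrp a < pvGrp b) || (!decide (pvGrp b < pvGrp a) && decide (a < b)))
      = fun a b => decide (pvKey a < pvKey b) := by
  funext a b
  rcases lt_trichotomy (pvGrp a) (pvGrp b) with h | h | h
  · simp [pvKey, Prod.Lex.lt_iff, h, not_lt.2 (le_of_lt h)]
  · simp [pvKey, Prod.Lex.lt_iff, h]
  · simp [pvKey, Prod.Lex.lt_iff, not_lt.2 (le_of_lt h), h.ne']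
    intro h'
    exact absurd h (not_lt.2 h')

-- B's sorted2 is the stable sort under pvKey
theorem alt_eq_sorted (xs : List String) :
    strChk_alt xs = PySem.List.sorted xs pvKey := by
  show xs.foldl (fun acc x => PySem.List.insertBy
      (fun a b : String => decide (pvGrp a < pvGrp b) || (!decide (pvGrp b < pvGrp a) && decide (a < b))) x acc) []
    = _
  rw [before_eq, PySem.List.sorted_eq_foldl_insertBy]

-- A's partition loop computes the two filters
theorem partition_loop (xs : List String) (a b : List String) :
    xs.foldl
      (fun (st : List String × List String) ele =>
        if PySem.Str.pyGet? ele 0 == some 'x' || PySem.Str.pyGet? ele 0 == some 'X' then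
          (st.1 ++ [ele], st.2)
        else
          (st.1, st.2 ++ [ele]))
      (a, b)
    = (a ++ xs.filter pvP, b ++ xs.filter (fun x => !pvP x)) := by
  induction xs generalizing a b with
  | nil => simp
  | cons x t ih =>
    rw [List.foldl_cons,
      show (PySem.Str.pyGet? x 0 == some 'x' || PySem.Str.pyGet? x 0 == some 'X') = pvP x from rfl]
    by_cases h : pvP x
    · rw [if_pos h, ih, List.filter_cons_of_pos h,
        List.filter_cons_of_neg (by simp [h])]
      simp
    · rw [if_neg h, ih, List.filter_cons_of_neg (by simp [h]),
        List.filter_cons_of_pos (by simp [h])]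
      simp

-- membership in the sorted filters fixes the group
theorem grp_of_mem_sortedP {xs : List String} {a : String}
    (ha : a ∈ PySem.List.sorted (xs.filter pvP) (fun s => s)) : pvGrp a = 0 := by
  have := List.mem_filter.1 ((PySem.List.sorted_perm _ _ _).mem_iff.1 ha)
  simp [pvGrp, this.2]

theorem grp_of_mem_sortedNP {xs : List String} {a : String}
    (ha : a ∈ PySem.List.sorted (xs.filter (fun x => !pvP x)) (fun s => s)) : pvGrp a = 1 := by
  have := List.mem_filter.1 ((PySem.List.sorted_perm _ _ _).mem_iff.1 ha)
  simp only [Bool.not_eq_true'] at this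
  simp [pvGrp, this.2]

-- ===== VERDICT (by name: the statement is the Claim_ definition above) =====
theorem strChk_spec : Claim_equal_strChk := by
  intro xs _ _
  show strChk xs = strChk_alt xs
  rw [alt_eq_sorted]
  unfold strChk
  rw [partition_loop]
  simp only [List.nil_append]
  refine PySem.List.eq_of_perm_of_pairwise_le_of_injective pvKey pvKey_inj
    (((PySem.List.sorted_perm _ _ _).append (PySem.List.sorted_perm _ _ _)).trans
      ((List.filter_append_perm pvP xs).trans (PySem.List.sorted_perm xs pvKey false).symm))
    ?_ (PySem.List.sorted_pairwise xs pvKey)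
  rw [List.pairwise_append]
  refine ⟨(PySem.List.sorted_pairwise _ _).imp_of_mem ?_,
          (PySem.List.sorted_pairwise _ _).imp_of_mem ?_, ?_⟩
  · intro a b ha hb hab
    exact Prod.Lex.le_iff.2 (Or.inr ⟨by simp [pvKey, grp_of_mem_sortedP ha, grp_of_mem_sortedP hb], hab⟩)
  · intro a b ha hb hab
    exact Prod.Lex.le_iff.2 (Or.inr ⟨by simp [pvKey, grp_of_mem_sortedNP ha, grp_of_mem_sortedNP hb], hab⟩)
  · intro a ha b hb
    exact Prod.Lex.le_iff.2 (Or.inl (by simp [pvKey, grp_of_mem_sortedP ha, grp_of_mem_sortedNP hb]))
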